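-- pv_equiv track=rewrite | github.com/Aphelack/353502_KARENIK_15 | IGI/LR3/task_3.py | words_starts_with_lowercase_consonant
-- ===== SOURCE A (Python) =====
-- def words_starts_with_lowercase_consonant(line : str) -> int:
--     '''
--     Calculates number or words starting with lowercase consonant letter
--     '''
--     consonant_letters = set(['q', 'w', 'r', 't', 'p', 's', 'd', 'f', 'g', 'h', 'j', 'k', 'l', 'z', 'x', 'c', 'v', 'b', 'n', 'm'])
--     words = line.split()
--     count = 0
--     for word in words:
--         if word[0] in consonant_letters:
--             count += 1
--     return count
-- ===== SOURCE B (Python) =====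
-- def words_starts_with_lowercase_consonant(line : str) -> int:
--     '''
--     Calculates number or words starting with lowercase consonant letter
--     '''
--     consonants = frozenset('qwrtpsdfghjklzxcvbnm')
--     count = 0
--     prev_space = True
--     for c in line:
--         if c.isspace():
--             prev_space = True
--         else:
--             if prev_space and c in consonants:
--                 count += 1
--             prev_space = False
--     return count
-- ===== Notes on version B (the rewrite author's own statement) =====
-- stated objective: alternative
-- what changed: B replaces split-then-index (building a words list and testing word[0]) with a single character scan that detects word starts via a previous-char-was-whitespace flag, using O(1) extra space.
import Mathlib
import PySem

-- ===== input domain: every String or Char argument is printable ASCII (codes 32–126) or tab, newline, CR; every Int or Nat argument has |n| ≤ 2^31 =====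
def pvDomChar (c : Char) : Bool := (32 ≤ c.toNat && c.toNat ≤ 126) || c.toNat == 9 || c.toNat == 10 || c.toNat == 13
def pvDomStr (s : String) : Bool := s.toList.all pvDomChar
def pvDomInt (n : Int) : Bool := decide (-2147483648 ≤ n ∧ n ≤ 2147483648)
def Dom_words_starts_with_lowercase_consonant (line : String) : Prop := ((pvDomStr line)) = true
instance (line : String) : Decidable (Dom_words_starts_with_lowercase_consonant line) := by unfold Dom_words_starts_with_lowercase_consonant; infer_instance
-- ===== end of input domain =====

-- B counts the same words with a single character scan and a prev-is-space flag instead of split()+word[0]; alternative decomposition, same asymptotic time.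
-- Port note: A's word[0] is ported as pyGetD word 0 ' ' — split() never yields an empty word, so the default is never used.

-- ===== PORT A =====
def pvConsA : PySem.Set Char := PySem.Set.ofList ['q','w','r','t','p','s','d','f','g','h','j','k','l','z','x','c','v','b','n','m']

def pvCondA (word : List Char) : Bool := decide (PySem.List.pyGetD word 0 ' ' ∈ pvConsA)

def words_starts_with_lowercase_consonant (line : String) : Int :=
  let words := PySem.Chars.split₀ line.toList
  words.foldl (fun count word => if pvCondA word then count + 1 else count) 0

-- ===== PORT B =====
def pvConsB : List Char := ['q','w','r','t','p','s','d','f','g','h','j','k','l','z','x','c','v','b','n','m']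

def pvAltLoop : List Char → Bool → Int → Int
  | [], _, count => count
  | c :: rest, prevSpace, count =>
    if PySem.Chars.isspace c then
      pvAltLoop rest true count
    else
      pvAltLoop rest false (if prevSpace && decide (c ∈ pvConsB) then count + 1 else count)

def words_starts_with_lowercase_consonant_alt (line : String) : Int :=
  pvAltLoop line.toList true 0

-- ===== PRECONDITION & SPEC =====
def Spec_words_starts_with_lowercase_consonant (line : String) (out : Int) : Prop := out = words_starts_with_lowercase_consonant_alt line
instance (line : String) (out : Int) : Decidable (Spec_words_starts_with_lowercase_consonant line out) := by unfold Spec_words_starts_with_lowercase_consonant; infer_instance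

-- ===== CLAIM (what is proved, stated in full; the proofs are below) =====
def Claim_equal_words_starts_with_lowercase_consonant : Prop := ∀ (line : String), Dom_words_starts_with_lowercase_consonant line → Spec_words_starts_with_lowercase_consonant line (words_starts_with_lowercase_consonant line)

-- ===== LEMMAS AND PROOFS =====
-- a word bonus: the contribution of the in-progress word (cur, stored reversed by split₀.go)
def pvBonus (cur : List Char) : Int :=
  if cur.isEmpty then 0 else (if pvCondA cur.reverse then 1 else 0)

lemma pvCondA_append_of_ne_nil (w : List Char) (c : Char) (h : w ≠ []) :
    pvCondA (w ++ [c]) = pvCondA w := by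
  cases w with
  | nil => exact absurd rfl h
  | cons x t =>
    simp [pvCondA, PySem.List.pyGetD, PySem.List.pyGet?, PySem.List.pyIdx?,
      show (0:Int) ≤ (t.length:Int) + 1 by positivity]

lemma pvMemAB (c : Char) : (c ∈ pvConsA) ↔ (c ∈ pvConsB) := by
  rw [pvConsA, PySem.Set.mem_ofList, pvConsB]

lemma pvAltLoop_shift (cs : List Char) : ∀ (p : Bool) (k : Int),
    pvAltLoop cs p k = k + pvAltLoop cs p 0 := by
  induction cs with
  | nil => intro p k; simp [pvAltLoop]
  | cons c rest ih =>
    intro p k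
    by_cases hs : PySem.Chars.isspace c
    · simp [pvAltLoop, hs, ih true k]
    · simp only [pvAltLoop, hs, if_false, Bool.false_eq_true]
      rw [ih false, ih false (if p && decide (c ∈ pvConsB) then 0 + 1 else 0)]
      split_ifs <;> omega

lemma pvInv (rest : List Char) : ∀ (cur : List Char) (acc : List (List Char)),
    (((PySem.Chars.split₀.go rest cur acc).countP pvCondA : Nat) : Int)
      = ((acc.reverse.countP pvCondA : Nat) : Int) + pvBonus cur + pvAltLoop rest cur.isEmpty 0 := by
  induction rest with
  | nil =>
    intro cur acc
    cases cur with
    | nil => simp [PySem.Chars.split₀.go, pvBonus, pvAltLoop]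
    | cons d t =>
      simp only [PySem.Chars.split₀.go, List.isEmpty_cons, Bool.false_eq_true, if_false,
        pvBonus, pvAltLoop, List.countP_reverse, List.countP_cons]
      split_ifs <;> push_cast <;> omega
  | cons c rest ih =>
    intro cur acc
    by_cases hs : PySem.Chars.isspace c
    · cases cur with
      | nil => simp [PySem.Chars.split₀.go, hs, ih, pvAltLoop, pvBonus]
      | cons d t =>
        simp only [PySem.Chars.split₀.go, hs, if_true, List.isEmpty_cons, Bool.false_eq_true,
          if_false, ih [] (((d :: t).reverse) :: acc), pvAltLoop, pvBonus,
          List.isEmpty_nil, List.countP_reverse, List.countP_cons]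
        split_ifs <;> push_cast <;> omega
    · cases cur with
      | nil =>
        simp only [PySem.Chars.split₀.go, hs, Bool.false_eq_true, if_false,
          ih [c] acc, pvAltLoop, pvBonus, List.isEmpty_nil, List.isEmpty_cons,
          Bool.true_and, List.reverse_cons, List.reverse_nil, List.nil_append]
        have hab : pvCondA [c] = decide (c ∈ pvConsB) := by
          simp [pvCondA, PySem.List.pyGetD, PySem.List.pyGet?, PySem.List.pyIdx?, pvMemAB]
        rw [pvAltLoop_shift rest false (if decide (c ∈ pvConsB) then 0 + 1 else 0), hab]
        split_ifs <;> omega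
      | cons d t =>
        simp only [PySem.Chars.split₀.go, hs, Bool.false_eq_true, if_false,
          ih (c :: d :: t) acc, pvAltLoop, pvBonus, List.isEmpty_cons, Bool.false_and]
        rw [List.reverse_cons, pvCondA_append_of_ne_nil _ c (by simp)]

-- ===== VERDICT (by name: the statement is the Claim_ definition above) =====
theorem words_starts_with_lowercase_consonant_spec : Claim_equal_words_starts_with_lowercase_consonant := by
  intro line _
  unfold Spec_words_starts_with_lowercase_consonant
  unfold words_starts_with_lowercase_consonant words_starts_with_lowercase_consonant_alt
  rw [PySem.List.foldl_count_if pvCondA]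
  have h := pvInv line.toList [] []
  simpa [PySem.Chars.split₀, pvBonus] using h
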